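-- pv_equiv track=rewrite | github.com/Luna-McBride/School_Work | Undergrad/CSCI-3104-Algorithms/Homework9/McBride-Luna-PS9b-Q2.py | dp
-- ===== SOURCE A (Python) =====
-- def dp(arr,n):
--     point=[] #Number of points per number of assignments
--     i=0 #Variable to use for our while loop to go through amounts of assignments
--
--     #While loop to loop through our assignments to find the optimal number of points for each
--     while i<n+1:
--         hold=[] #Holder of the assignment chosen
--         if i==0: #No need to compare if we are only looking at one value
--             point.append(arr[0]) #Append the point value for one item
--         else: #If we have a list bigger than 1
--             summ=0 #Holder for the sum of all point values
--             j=0 #Variable for the while loop to get the points for items 0 to i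
--
--             #While loop to find the optimal point values for assignments 1-i
--             while j<i:
--                 if j==i-1: #If there is only one left
--                     r=arr[i-1] #Get that last value
--                     hold.append(arr[i-1]) #Put the value into the array of chosen items
--                 else: #If there are more than one value left to check
--                     r=max(arr[j],arr[j+1]) #Find the max of the two neighboring items
--                     if r==arr[j+1]: #If it is the right item
--                         j=j+1 #Add an extra to j, eliminating the possibility of having two consecutive assignments
--                     hold.append(arr[j]) #Append the chosen value to our list of chosen values
--                 summ+=r #Add the value to our sum
--                 j+=2 #Jump j up by 2, also to try to eliminate consecutive homeworks
--             point.append(summ) #add this point sum to our list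
--         i+=1 #Up i by 1, expanding our scope by one assignment
--     return point[n],hold #Return our final points as well as our chosen values of the last iteration
-- ===== SOURCE B (Python) =====
-- def dp(arr, n):
--     # Single greedy pass over the first n items (A recomputes it for every
--     # prefix 0..n and keeps only the last); skip counter replaces A's index jumps.
--     if n == 0:
--         return arr[0], []
--     total = 0
--     hold = []
--     skip = 0
--     for k in range(n):
--         if skip:
--             skip -= 1
--         elif k + 1 < n and arr[k + 1] >= arr[k]:
--             total += arr[k + 1]
--             hold.append(arr[k + 1])
--             skip = 2
--         else:
--             total += arr[k]
--             hold.append(arr[k])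
--             skip = 1
--     return total, hold
-- ===== Notes on version B (the rewrite author's own statement) =====
-- stated objective: faster
-- what changed: A reruns its greedy inner scan for every prefix i=0..n and keeps only the last result; B runs one single greedy pass over the first n elements (a for-loop with a skip counter instead of A's nested while loops with index jumps).
-- outside the precondition, e.g. on dp([1, 5], 3): A returns (5, [5]), B returns (5, [5])
import Mathlib
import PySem

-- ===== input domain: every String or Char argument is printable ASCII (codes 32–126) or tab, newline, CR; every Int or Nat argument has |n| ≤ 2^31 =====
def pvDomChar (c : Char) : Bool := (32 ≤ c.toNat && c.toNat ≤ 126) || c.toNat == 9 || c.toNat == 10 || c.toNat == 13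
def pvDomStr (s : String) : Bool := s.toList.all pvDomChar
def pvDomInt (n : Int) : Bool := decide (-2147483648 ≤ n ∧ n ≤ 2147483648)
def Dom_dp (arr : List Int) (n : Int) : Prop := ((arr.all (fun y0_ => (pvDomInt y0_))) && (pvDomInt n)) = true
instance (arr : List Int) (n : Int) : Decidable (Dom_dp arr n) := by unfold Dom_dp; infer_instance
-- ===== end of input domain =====

-- B replaces A's per-prefix recomputation (nested while loops, O(n^2)) by one greedy
-- pass with a skip counter (O(n)); measured faster, same return value on Pre_dp.


-- ===== PORT A =====
-- arr[k] is ported as (pyGet? …).getD 0: on Pre_dp every access is in range, so the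
-- default is never used; out of range Python raises IndexError (excluded by Pre_dp).
-- inner while loop of A (state j, summ, hold), for iteration i
def dpInnerA (arr : List Int) (i : Int) (j summ : Int) (hold : List Int) : Int × List Int :=
  if _h : j < i then
    if j == i - 1 then
      dpInnerA arr i (j + 2) (summ + (PySem.List.pyGet? arr (i - 1)).getD 0)
        (hold ++ [(PySem.List.pyGet? arr (i - 1)).getD 0])
    else
      let r := max ((PySem.List.pyGet? arr j).getD 0) ((PySem.List.pyGet? arr (j + 1)).getD 0)
      let j' := if r == (PySem.List.pyGet? arr (j + 1)).getD 0 then j + 1 else j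
      dpInnerA arr i (j' + 2) (summ + r) (hold ++ [(PySem.List.pyGet? arr j').getD 0])
  else (summ, hold)
termination_by (i - j).toNat
decreasing_by
  · omega
  · split <;> omega

-- outer while loop of A (state i, point, hold); hold is reset each iteration
def dpOuterA (arr : List Int) (n : Int) (i : Int) (point hold : List Int) : List Int × List Int :=
  if _h : i < n + 1 then
    if i == 0 then
      dpOuterA arr n (i + 1) (point ++ [(PySem.List.pyGet? arr 0).getD 0]) []
    else
      let p := dpInnerA arr i 0 0 []
      dpOuterA arr n (i + 1) (point ++ [p.1]) p.2
  else (point, hold)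
termination_by (n + 1 - i).toNat
decreasing_by all_goals omega

def dp (arr : List Int) (n : Int) : Int × List Int :=
  let p := dpOuterA arr n 0 [] []
  ((PySem.List.pyGet? p.1 n).getD 0, p.2)

-- ===== PORT B =====
-- one step of B's for-loop over range(n); state (total, hold, skip)
def dpStepB (arr : List Int) (n : Int) (st : Int × List Int × Int) (k : Int) :
    Int × List Int × Int :=
  let (total, hold, skip) := st
  if skip ≠ 0 then (total, hold, skip - 1)
  else if k + 1 < n ∧ (PySem.List.pyGet? arr (k + 1)).getD 0 ≥ (PySem.List.pyGet? arr k).getD 0 then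
    (total + (PySem.List.pyGet? arr (k + 1)).getD 0,
     hold ++ [(PySem.List.pyGet? arr (k + 1)).getD 0], 2)
  else
    (total + (PySem.List.pyGet? arr k).getD 0, hold ++ [(PySem.List.pyGet? arr k).getD 0], 1)

def dp_alt (arr : List Int) (n : Int) : Int × List Int :=
  if n == 0 then ((PySem.List.pyGet? arr 0).getD 0, [])
  else
    let st := (PySem.List.pyRange 0 n 1).foldl (dpStepB arr n) (0, [], 0)
    (st.1, st.2.1)

-- ===== PRECONDITION & SPEC =====
-- Pre_dp excludes n > len(arr) (and n < 0 / empty arr): there A raises IndexError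
-- (or NameError), except for some n = len(arr)+1 inputs where its final greedy jump
-- skips past the end and it returns — B returns the same value on those.
def Pre_dp (arr : List Int) (n : Int) : Prop := arr ≠ [] ∧ 0 ≤ n ∧ n ≤ arr.length
instance (arr : List Int) (n : Int) : Decidable (Pre_dp arr n) := by unfold Pre_dp; infer_instance
def pvWitness_dp : List Int × Int := ([3, 1, 4, 2], 3)

def Spec_dp (arr : List Int) (n : Int) (out : Int × List Int) : Prop := out = dp_alt arr n
instance (arr : List Int) (n : Int) (out : Int × List Int) : Decidable (Spec_dp arr n out) := by unfold Spec_dp; infer_instance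

-- ===== CLAIM (what is proved, stated in full; the proofs are below) =====
def Claim_equal_dp : Prop := ∀ (arr : List Int) (n : Int), Dom_dp arr n → Pre_dp arr n → Spec_dp arr n (dp arr n)

-- ===== LEMMAS AND PROOFS =====

-- one step of B's fold with a nonzero skip counter only decrements it
theorem stepB_skip (arr : List Int) (n total : Int) (hold : List Int) (s k : Int) (hs : s ≠ 0) :
    dpStepB arr n (total, hold, s) k = (total, hold, s - 1) := by
  simp [dpStepB, hs]

-- B's fold from position j with skip = 0 computes A's inner loop (i = n) from j.
theorem innerA_eq_fold (arr : List Int) (n : Int) :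
    ∀ m : Nat, ∀ j summ hold, j + (m : Int) = n →
      (((PySem.List.pyRange j n 1).foldl (dpStepB arr n) (summ, hold, 0)).1,
       ((PySem.List.pyRange j n 1).foldl (dpStepB arr n) (summ, hold, 0)).2.1)
        = dpInnerA arr n j summ hold := by
  intro m
  induction m using Nat.strong_induction_on with
  | _ m IH =>
    intro j summ hold hm
    by_cases hjn : j < n
    · rw [PySem.List.pyRange_one_cons hjn]
      conv_rhs => rw [dpInnerA]
      rw [dif_pos hjn]
      by_cases hlast : j = n - 1
      · -- last position: both take arr[n-1] and stop
        have h1 : ((j == n - 1)) = true := by simp [hlast]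
        have h2 : PySem.List.pyRange (j + 1) n 1 = [] :=
          PySem.List.pyRange_one_eq_nil (by omega)
        have h3 : ¬ j + 2 < n := by omega
        conv_rhs => rw [dpInnerA]
        simp only [h1, if_true, dif_neg h3]
        simp [dpStepB, hlast]
      · have h1 : ((j == n - 1)) = false := by simp [hlast]
        have hj1 : j + 1 < n := by omega
        simp only [h1, Bool.false_eq_true, if_false]
        by_cases hab : (PySem.List.pyGet? arr j).getD 0 ≤ (PySem.List.pyGet? arr (j + 1)).getD 0
        · -- A bumps j; B takes arr[j+1] and skips two positions
          have hmax : max ((PySem.List.pyGet? arr j).getD 0) ((PySem.List.pyGet? arr (j + 1)).getD 0)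
              = (PySem.List.pyGet? arr (j + 1)).getD 0 := max_eq_right hab
          have step0 : dpStepB arr n (summ, hold, 0) j
              = (summ + (PySem.List.pyGet? arr (j + 1)).getD 0,
                 hold ++ [(PySem.List.pyGet? arr (j + 1)).getD 0], 2) := by
            simp [dpStepB, hj1, hab]
          simp only [hmax, BEq.rfl, if_true, List.foldl_cons, step0]
          rw [PySem.List.pyRange_one_cons hj1, List.foldl_cons,
            stepB_skip arr n _ _ 2 (j + 1) (by norm_num)]
          by_cases hj2 : j + 2 < n
          · rw [show j + 1 + 1 = j + 2 by ring, PySem.List.pyRange_one_cons hj2,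
              List.foldl_cons, stepB_skip arr n _ _ (2 - 1) (j + 2) (by norm_num)]
            have := IH (m - 3) (by omega) (j + 2 + 1)
              (summ + (PySem.List.pyGet? arr (j + 1)).getD 0)
              (hold ++ [(PySem.List.pyGet? arr (j + 1)).getD 0]) (by omega)
            rw [show (2 : Int) - 1 - 1 = 0 by norm_num, this,
              show j + 2 + 1 = j + 1 + 2 by ring]
          · have h4 : PySem.List.pyRange (j + 1 + 1) n 1 = [] :=
              PySem.List.pyRange_one_eq_nil (by omega)
            rw [h4]
            conv_rhs => rw [dpInnerA]
            simp [dif_neg (show ¬ j + 1 + 2 < n by omega)]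
        · -- A keeps j; B takes arr[j] and skips one position
          have hmax : max ((PySem.List.pyGet? arr j).getD 0) ((PySem.List.pyGet? arr (j + 1)).getD 0)
              = (PySem.List.pyGet? arr j).getD 0 := max_eq_left (by omega)
          have hne : ((PySem.List.pyGet? arr j).getD 0 == (PySem.List.pyGet? arr (j + 1)).getD 0)
              = false := by simp; omega
          have step0 : dpStepB arr n (summ, hold, 0) j
              = (summ + (PySem.List.pyGet? arr j).getD 0,
                 hold ++ [(PySem.List.pyGet? arr j).getD 0], 1) := by
            simp only [dpStepB, if_neg (by omega : ¬ (0 : Int) ≠ 0),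
              if_neg (show ¬ (j + 1 < n ∧ (PySem.List.pyGet? arr j).getD 0 ≤
                (PySem.List.pyGet? arr (j + 1)).getD 0) from fun h => hab h.2)]
          simp only [hmax, hne, Bool.false_eq_true, if_false, List.foldl_cons, step0]
          rw [PySem.List.pyRange_one_cons hj1, List.foldl_cons,
            stepB_skip arr n _ _ 1 (j + 1) (by norm_num),
            show (1 : Int) - 1 = 0 by norm_num,
            IH (m - 2) (by omega) (j + 1 + 1) (summ + (PySem.List.pyGet? arr j).getD 0)
              (hold ++ [(PySem.List.pyGet? arr j).getD 0]) (by omega),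
            show j + 1 + 1 = j + 2 by ring]
    · have h2 : PySem.List.pyRange j n 1 = [] := PySem.List.pyRange_one_eq_nil (by omega)
      rw [dpInnerA, dif_neg hjn, h2]
      simp

-- A's outer loop: final point list is point ++ [s_i, …, s_n], final hold is h_n.
theorem outerA_spec (arr : List Int) (n : Int) :
    ∀ k : Nat, ∀ i point hold, 0 < i → i + (k : Int) = n + 1 →
      dpOuterA arr n i point hold
        = (point ++ (List.range k).map (fun t : Nat => (dpInnerA arr (i + (t : Int)) 0 0 []).1),
           if k = 0 then hold else (dpInnerA arr n 0 0 []).2) := by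
  intro k
  induction k with
  | zero =>
    intro i point hold hi hk
    rw [dpOuterA, dif_neg (by omega : ¬ i < n + 1)]
    simp
  | succ k IHk =>
    intro i point hold hi hk
    have h0 : (i == 0) = false := by simp; omega
    rw [dpOuterA, dif_pos (by omega : i < n + 1)]
    simp only [h0, Bool.false_eq_true, if_false]
    rw [IHk (i + 1) _ _ (by omega) (by push_cast at hk; omega)]
    refine Prod.ext ?_ ?_
    · simp only [List.range_succ_eq_map, List.map_cons, List.map_map, List.cons_append,
        List.append_assoc, Nat.cast_zero, add_zero]
      simp only [List.nil_append]
      refine congrArg (point ++ ·) ?_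
      simp only [List.cons_inj_right]
      refine List.map_congr_left (fun t _ => ?_)
      simp only [Function.comp_apply]
      have e : i + 1 + (t : Int) = i + ((Nat.succ t : Nat) : Int) := by push_cast; ring
      rw [e]
    · simp only [Nat.succ_ne_zero, if_false]
      by_cases hk0 : k = 0
      · have hin : i = n := by omega
        simp [hk0, hin]
      · simp [hk0]

-- ===== VERDICT (by name: the statement is the Claim_ definition above) =====
theorem dp_spec : Claim_equal_dp := by
  unfold Claim_equal_dp
  intro arr n _ hpre
  obtain ⟨hne, hn0, hlen⟩ := hpre
  unfold Spec_dp dp dp_alt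
  by_cases hn : n = 0
  · subst hn
    rw [dpOuterA, dif_pos (by omega : (0 : Int) < 0 + 1)]
    simp only [BEq.rfl, if_true]
    rw [dpOuterA, dif_neg (by omega : ¬ (0 : Int) + 1 < 0 + 1)]
    simp
  · have hnb : (n == 0) = false := by simp [hn]
    simp only [hnb, Bool.false_eq_true, if_false]
    rw [dpOuterA, dif_pos (by omega : (0 : Int) < n + 1)]
    simp only [BEq.rfl, if_true]
    rw [outerA_spec arr n n.toNat (0 + 1) _ _ (by omega) (by omega)]
    rw [innerA_eq_fold arr n n.toNat 0 0 [] (by omega)]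
    have hget : PySem.List.pyGet?
        (([] ++ [(PySem.List.pyGet? arr 0).getD 0]) ++
          (List.range n.toNat).map (fun t : Nat => (dpInnerA arr (0 + 1 + (t : Int)) 0 0 []).1)) n
        = some ((dpInnerA arr n 0 0 []).1) := by
      rw [show n = ((n.toNat : Nat) : Int) from (Int.toNat_of_nonneg hn0).symm,
        PySem.List.pyGet?_natCast]
      rw [List.getElem?_append_right (by simp; omega)]
      simp only [Int.toNat_natCast, List.nil_append, List.length_cons, List.length_nil,
        List.getElem?_map]
      rw [List.getElem?_range (by omega : n.toNat - 1 < n.toNat)]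
      simp only [Option.map_some, Option.some.injEq]
      congr 2
      omega
    rw [hget]
    simp [show ¬ n.toNat = 0 from by omega]
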